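-- pv_equiv track=rewrite | github.com/alanmorshinin/MORSHININ | 10 practic/8.py | alan
-- ===== SOURCE A (Python) =====
-- def alan(n):
--     if n == 1:
--         return 1
--     else:
--         a = 0
--         for i in range(1, n + 1):
--             a += alan(n - i)
--         return a
-- ===== SOURCE B (Python) =====
-- def alan(n):
--     if n <= 0:
--         return 0
--     if n == 1:
--         return 1
--     return 2 ** (n - 2)
-- ===== Notes on version B (the rewrite author's own statement) =====
-- stated objective: simpler
-- what changed: replaced the recursion that re-sums all previous values by the closed form 2**(n-2) (0 for n<=0, 1 for n=1); Pre_ excludes n >= 999, where A's depth-n recursion exceeds CPython's recursion limit and never returns a value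
import Mathlib
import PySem

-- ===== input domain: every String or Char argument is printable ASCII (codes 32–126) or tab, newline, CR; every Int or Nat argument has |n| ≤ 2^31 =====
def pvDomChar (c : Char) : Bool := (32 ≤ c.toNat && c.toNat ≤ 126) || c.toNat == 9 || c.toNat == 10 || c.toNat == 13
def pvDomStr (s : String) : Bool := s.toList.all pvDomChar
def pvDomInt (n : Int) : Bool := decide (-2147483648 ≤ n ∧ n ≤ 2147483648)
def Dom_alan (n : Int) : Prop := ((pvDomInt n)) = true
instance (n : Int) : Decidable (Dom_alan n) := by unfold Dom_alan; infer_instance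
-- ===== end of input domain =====

-- B replaces A's recursive sum of all previous values by the closed-form answer 2^(n-2); simpler (intended as faster; a timing run could not measure a ratio because A does not finish on that run's sizes).

-- ===== PORT A =====
-- literal transliteration: if n == 1 return 1 else a = 0; for i in range(1, n+1): a += alan(n-i); return a
def alan (n : Int) : Int :=
  if n = 1 then 1
  else
    (PySem.List.pyRange 1 (n + 1) 1).attach.foldl
      (fun a i => a + alan (n - i.1)) 0
termination_by n.toNat
decreasing_by
  have h := (PySem.List.mem_pyRange_one).mp i.2
  omega

-- ===== PORT B =====
def alan_alt (n : Int) : Int :=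
  if n ≤ 0 then 0
  else if n = 1 then 1
  else 2 ^ (n - 2).toNat

-- ===== PRECONDITION & SPEC =====
-- A's recursion depth is n, so for n ≥ 999 it exceeds CPython's recursion limit and never returns a value (RecursionError); Pre_ excludes exactly those inputs.
def Pre_alan (n : Int) : Prop := n < 999
instance (n : Int) : Decidable (Pre_alan n) := by unfold Pre_alan; infer_instance
def pvWitness_alan : Int := (5)
def Spec_alan (n : Int) (out : Int) : Prop := out = alan_alt n
instance (n : Int) (out : Int) : Decidable (Spec_alan n out) := by unfold Spec_alan; infer_instance

-- ===== CLAIM (what is proved, stated in full; the proofs are below) =====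
def Claim_equal_alan : Prop := ∀ (n : Int), Dom_alan n → Pre_alan n → Spec_alan n (alan n)

-- ===== LEMMAS AND PROOFS =====

-- sum of alan_alt over n-1, n-2, …, 0 equals 2^(m-2) when m = n.toNat ≥ 2
theorem alan_alt_sum (m : Nat) (h : 2 ≤ m) :
    ((List.range m).map (fun k : Nat => alan_alt ((m : Int) - 1 - k))).sum = 2 ^ (m - 2) := by
  induction m with
  | zero => omega
  | succ m ih =>
    rcases Nat.lt_or_ge m 2 with hm | hm
    · interval_cases m
      · omega
      · decide
    · rw [List.range_succ_eq_map]
      simp only [List.map_cons, List.map_map, List.sum_cons]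
      have e1 : alan_alt (((m + 1 : Nat) : Int) - 1 - ((0 : Nat) : Int)) = 2 ^ (m - 2) := by
        have h0 : ¬ (((m + 1 : Nat) : Int) - 1 - ((0 : Nat) : Int) ≤ 0) := by push_cast; omega
        have h1 : (((m + 1 : Nat) : Int) - 1 - ((0 : Nat) : Int) ≠ 1) := by push_cast; omega
        simp only [alan_alt, if_neg h0, if_neg h1]
        congr 1
        omega
      have e2 : ((List.range m).map ((fun k : Nat => alan_alt (((m + 1 : Nat) : Int) - 1 - (k : Int))) ∘ Nat.succ))
          = (List.range m).map (fun k : Nat => alan_alt ((m : Int) - 1 - k)) := by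
        apply List.map_congr_left
        intro k _
        simp only [Function.comp]
        congr 1
        push_cast
        ring
      rw [e1, e2, ih hm, show m + 1 - 2 = (m - 2) + 1 from by omega, pow_succ]
      ring

theorem alan_eq_alt : ∀ (n : Int), alan n = alan_alt n := by
  have main : ∀ (m : Nat) (n : Int), n.toNat = m → alan n = alan_alt n := by
    intro m
    induction m using Nat.strong_induction_on with
    | _ m ih =>
      intro n hm
      by_cases h1 : n = 1
      · subst h1; simp [alan, alan_alt]
      · rw [alan, if_neg h1, List.foldl_attach (f := fun a i => a + alan (n - i))]
        by_cases hle : n ≤ 0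
        · rw [PySem.List.pyRange_one_eq_nil (by omega)]
          simp [alan_alt, hle]
        · have hn2 : 2 ≤ n := by omega
          have hfold : ∀ (l : List Int) (c : Int),
              l.foldl (fun a i => a + alan (n - i)) c
                = c + (l.map (fun i => alan (n - i))).sum := by
            intro l
            induction l with
            | nil => intro c; simp
            | cons x xs ihl =>
              intro c
              simp only [List.foldl_cons, List.map_cons, List.sum_cons]
              rw [ihl]
              ring
          rw [hfold, zero_add]
          have hcong : (PySem.List.pyRange 1 (n + 1) 1).map (fun i => alan (n - i))
              = (PySem.List.pyRange 1 (n + 1) 1).map (fun i => alan_alt (n - i)) := by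
            apply List.map_congr_left
            intro i hi
            have hmem := (PySem.List.mem_pyRange_one).mp hi
            exact ih (n - i).toNat (by omega) _ rfl
          rw [hcong]
          rw [PySem.List.pyRange_one]
          rw [List.map_map]
          have e : ((List.range ((n + 1) - 1).toNat).map
                ((fun i : Int => alan_alt (n - i)) ∘ (fun k : Nat => (1 : Int) + k)))
              = ((List.range n.toNat).map (fun k : Nat => ((n.toNat : Int) - 1 - k))).map alan_alt := by
            have : ((n + 1) - 1).toNat = n.toNat := by omega
            rw [this, List.map_map]
            apply List.map_congr_left
            intro k _
            simp only [Function.comp]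
            congr 1
            omega
          rw [e, List.map_map]
          simp only [Function.comp_def]
          rw [alan_alt_sum n.toNat (by omega)]
          simp only [alan_alt, if_neg hle, if_neg h1]
          congr 1
          omega
  intro n
  exact main n.toNat n rfl

-- ===== VERDICT (by name: the statement is the Claim_ definition above) =====
theorem alan_spec : Claim_equal_alan := by
  intro n _ _
  unfold Spec_alan
  exact alan_eq_alt n
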